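-- pv_equiv track=rewrite | github.com/iks15174/study | programmers/인사고과.py | solution
-- ===== SOURCE A (Python) =====
-- def get_rank(score_sums, target):
--     ans = 1
--     for ss in score_sums:
--         if ss > target:
--             ans += 1
--     return ans
--
-- def solution(scores):
--     wanho_score = [scores[0][0], scores[0][1]]
--     scores = sorted(scores, key = lambda x : (-x[0], x[1]))
--     incentive_man = []
--
--     pr_max = -1
--     for wa, pr in scores:
--         if pr < pr_max:
--             if [wa, pr] == wanho_score:
--                 return -1
--             continue
--         else:
--             incentive_man.append([wa, pr])
--             pr_max = pr
--     return get_rank(list(map(lambda x : x[0] + x[1], incentive_man)), wanho_score[0] + wanho_score[1])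
-- ===== SOURCE B (Python) =====
-- def solution(scores):
--     w0, w1 = scores[0][0], scores[0][1]
--
--     def dominated(a, b):
--         return any(c > a and d > b for c, d in scores)
--
--     if dominated(w0, w1):
--         return -1
--     wt = w0 + w1
--     rank = 1
--     for a, b in scores:
--         if a + b > wt and not dominated(a, b):
--             rank += 1
--     return rank
-- ===== Notes on version B (the rewrite author's own statement) =====
-- stated objective: simpler
-- what changed: Replaced A's sort by (-first, second) plus pr_max staircase sweep with a direct pairwise strict-domination scan: return -1 if anyone beats Wanho in both scores, else count the undominated people with a strictly larger total.
-- intended difference: On inputs where Wanho is undominated but some second score is below A's pr_max sentinel -1: A returns -1 when Wanho's own second score is < -1, and otherwise omits undominated rows with second score < -1 and total above Wanho's from the rank count, while B returns the true Pareto rank, which is the intended value. — e.g. on solution([[-5, -5]]): A returns -1, B returns 1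
import Mathlib
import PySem

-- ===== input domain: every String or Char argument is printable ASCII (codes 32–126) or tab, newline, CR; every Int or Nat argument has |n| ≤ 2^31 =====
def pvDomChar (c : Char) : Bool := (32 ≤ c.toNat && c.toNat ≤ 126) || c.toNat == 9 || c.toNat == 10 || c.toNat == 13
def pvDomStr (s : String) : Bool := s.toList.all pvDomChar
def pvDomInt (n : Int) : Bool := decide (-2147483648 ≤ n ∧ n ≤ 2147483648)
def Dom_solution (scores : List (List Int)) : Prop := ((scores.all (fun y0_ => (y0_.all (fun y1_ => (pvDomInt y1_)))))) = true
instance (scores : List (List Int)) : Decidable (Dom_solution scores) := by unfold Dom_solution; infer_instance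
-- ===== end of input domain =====

-- B replaces A's sort-by-(-first,second) + pr_max staircase sweep with a direct pairwise
-- strict-domination scan (simpler); on inputs reaching A's pr_max sentinel -1 (a second score
-- below -1) A's returned value is wrong and B returns the intended Pareto rank: see D_solution.

-- ===== PORT A =====
-- row accessors: Python's x[0] / x[1] on a row (total via pyGetD; Pre_ guarantees length-2 rows)
def pvG0 (r : List Int) : Int := PySem.List.pyGetD r 0 0
def pvG1 (r : List Int) : Int := PySem.List.pyGetD r 1 0
-- x[0] + x[1], the incentive total of a row (used by both ports)
def pvSum (r : List Int) : Int := pvG0 r + pvG1 r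

def get_rank (score_sums : List Int) (target : Int) : Int :=
  score_sums.foldl (fun ans ss => if ss > target then ans + 1 else ans) 1

-- A's `for wa, pr in scores` sweep; `none` is A's mid-loop `return -1`
def sweepA (wanho : List Int) : List (List Int) → Int → List (List Int) → Option (List (List Int))
  | [], _, inc => some inc
  | r :: rest, prMax, inc =>
    let wa := pvG0 r
    let pr := pvG1 r
    if pr < prMax then
      (if [wa, pr] = wanho then none else sweepA wanho rest prMax inc)
    else sweepA wanho rest pr (inc ++ [[wa, pr]])

def solution (scores : List (List Int)) : Int :=
  let row0 := PySem.List.pyGetD scores 0 []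
  let wanho : List Int := [pvG0 row0, pvG1 row0]
  let s := PySem.List.sorted2 scores (fun x => -(pvG0 x)) (fun x => pvG1 x)
  match sweepA wanho s (-1) [] with
  | none => -1
  | some inc =>
      get_rank (inc.map (fun x => pvSum x)) (pvSum wanho)

-- ===== PORT B =====
-- dominated(a, b): someone beats (a, b) strictly in both scores
def dominatedIn (scores : List (List Int)) (a b : Int) : Bool :=
  scores.any (fun q => a < pvG0 q && b < pvG1 q)

def solution_alt (scores : List (List Int)) : Int :=
  let row0 := PySem.List.pyGetD scores 0 []
  let w0 := pvG0 row0
  let w1 := pvG1 row0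
  if dominatedIn scores w0 w1 then -1
  else
    let wt := w0 + w1
    scores.foldl
      (fun rank r =>
        if wt < pvSum r ∧ ¬ dominatedIn scores (pvG0 r) (pvG1 r) then rank + 1 else rank)
      1

-- ===== PRECONDITION & SPEC =====
-- Pre_ excludes exactly the inputs where Python A raises: an empty list (IndexError on scores[0])
-- or a row whose length is not 2 (IndexError in the sort key / ValueError unpacking `wa, pr`).
def Pre_solution (scores : List (List Int)) : Prop :=
  scores ≠ [] ∧ ∀ r ∈ scores, r.length = 2
instance (scores : List (List Int)) : Decidable (Pre_solution scores) := by
  unfold Pre_solution; infer_instance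

def pvWitness_solution : List (List Int) := [[2, 2], [1, 4], [3, 2], [3, 2], [2, 1]]

-- On inputs where Wanho is undominated but a second score lies below A's pr_max sentinel -1:
-- A returns -1 when Wanho's own second score is < -1, and otherwise omits undominated rows with
-- second score < -1 and total above Wanho's from the rank count; B returns the true Pareto rank,
-- which is the intended value.
def D_solution (scores : List (List Int)) : Prop :=
  let und := fun r => ∀ q ∈ scores, pvG0 q ≤ pvG0 r ∨ pvG1 q ≤ pvG1 r
  let w := scores.headD []
  und w ∧ ∃ r ∈ scores, pvG1 r < -1 ∧ und r ∧ (pvG1 w < -1 ∨ pvSum w < pvSum r)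
instance (scores : List (List Int)) : Decidable (D_solution scores) := by
  unfold D_solution; infer_instance

def Spec_solution (scores : List (List Int)) (out : Int) : Prop :=
  ¬ D_solution scores → out = solution_alt scores
instance (scores : List (List Int)) (out : Int) : Decidable (Spec_solution scores out) := by
  unfold Spec_solution; infer_instance

def pvDiffWitness_solution : List (List Int) := [[-5, -5]]
def pvDiffWitnessOut_solution : Int × Int := (-1, 1)

-- ===== CLAIM (what is proved, stated in full; the proofs are below) =====
def Claim_unchanged_solution : Prop :=
  ∀ (scores : List (List Int)), Dom_solution scores → Pre_solution scores →
    Spec_solution scores (solution scores)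
def Claim_changed_solution : Prop :=
  Dom_solution (pvDiffWitness_solution) ∧ Pre_solution (pvDiffWitness_solution) ∧
    D_solution (pvDiffWitness_solution) ∧
    solution (pvDiffWitness_solution) = pvDiffWitnessOut_solution.1 ∧
    solution_alt (pvDiffWitness_solution) = pvDiffWitnessOut_solution.2 ∧
    pvDiffWitnessOut_solution.1 ≠ pvDiffWitnessOut_solution.2
def Claim_exact_solution : Prop :=
  ∀ (scores : List (List Int)), Dom_solution scores → Pre_solution scores →
    D_solution scores → solution scores ≠ solution_alt scores

-- ===== LEMMAS AND PROOFS =====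

def pvBef (a b : List Int) : Bool :=
  decide (-(pvG0 a) < -(pvG0 b)) || (!decide (-(pvG0 b) < -(pvG0 a)) && decide (pvG1 a < pvG1 b))

theorem sortedA_eq (xs : List (List Int)) :
    PySem.List.sorted2 xs (fun x => -(pvG0 x)) (fun x => pvG1 x) =
      xs.foldl (fun acc x => PySem.List.insertBy pvBef x acc) [] := rfl

theorem pvBef_false_iff (a b : List Int) :
    pvBef b a = false ↔ pvG0 b ≤ pvG0 a ∧ (pvG0 b < pvG0 a ∨ pvG1 a ≤ pvG1 b) := by
  simp [pvBef]; omega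

theorem pvBef_trans {a b c : List Int} (h1 : pvBef a b = true) (h2 : pvBef b c = true) :
    pvBef a c = true := by
  simp [pvBef] at *; omega

theorem pvBef_asymm {a b : List Int} (h1 : pvBef a b = true) : pvBef b a = false := by
  simp [pvBef] at *; omega

theorem insertBy_pairwise (x : List Int) (ys : List (List Int))
    (h : ys.Pairwise (fun a b => pvBef b a = false)) :
    (PySem.List.insertBy pvBef x ys).Pairwise (fun a b => pvBef b a = false) := by
  induction ys with
  | nil => simp [PySem.List.insertBy]
  | cons y ys ih =>
    rw [List.pairwise_cons] at h
    by_cases hb : pvBef x y = true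
    · have : PySem.List.insertBy pvBef x (y :: ys) = x :: y :: ys := by
        simp [PySem.List.insertBy, hb]
      rw [this, List.pairwise_cons]
      refine ⟨?_, List.pairwise_cons.mpr h⟩
      intro z hz
      rcases List.mem_cons.mp hz with rfl | hz
      · exact pvBef_asymm hb
      · by_cases hzx : pvBef z x = true
        · have := pvBef_trans hzx hb
          rw [h.1 z hz] at this; cases this
        · exact Bool.eq_false_iff.mpr hzx
    · have : PySem.List.insertBy pvBef x (y :: ys) = y :: PySem.List.insertBy pvBef x ys := by
        simp [PySem.List.insertBy, hb]
      rw [this, List.pairwise_cons]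
      refine ⟨?_, ih h.2⟩
      intro z hz
      rcases (PySem.List.mem_insertBy pvBef x z ys).mp hz with rfl | hz
      · exact Bool.eq_false_iff.mpr hb
      · exact h.1 z hz

theorem foldl_insertBy_pairwise (xs : List (List Int)) :
    ∀ acc : List (List Int), acc.Pairwise (fun a b => pvBef b a = false) →
      (xs.foldl (fun acc x => PySem.List.insertBy pvBef x acc) acc).Pairwise
        (fun a b => pvBef b a = false) := by
  induction xs with
  | nil => intro acc h; simpa using h
  | cons x xs ih =>
    intro acc h
    exact ih _ (insertBy_pairwise x acc h)

theorem sortedA_pairwise (xs : List (List Int)) :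
    (PySem.List.sorted2 xs (fun x => -(pvG0 x)) (fun x => pvG1 x)).Pairwise
      (fun a b => pvBef b a = false) := by
  rw [sortedA_eq]
  exact foldl_insertBy_pairwise xs [] (by simp)

def pvMaxPr (p : List (List Int)) : Int := p.foldl (fun m r => max m (pvG1 r)) (-1)
def pvAdom (full : List (List Int)) (r : List Int) : Bool :=
  dominatedIn full (pvG0 r) (pvG1 r) || decide (pvG1 r < -1)

theorem lt_foldlMax (p : List (List Int)) (x : Int) :
    ∀ init : Int, (x < p.foldl (fun m r => max m (pvG1 r)) init) ↔
      (x < init ∨ ∃ e ∈ p, x < pvG1 e) := by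
  induction p with
  | nil => simp
  | cons e p ih =>
    intro init
    rw [List.foldl_cons, ih]
    simp only [List.mem_cons]
    constructor
    · rintro (h | ⟨f, hf, hx⟩)
      · rcases lt_max_iff.mp h with h | h
        · exact Or.inl h
        · exact Or.inr ⟨e, Or.inl rfl, h⟩
      · exact Or.inr ⟨f, Or.inr hf, hx⟩
    · rintro (h | ⟨f, rfl | hf, hx⟩)
      · exact Or.inl (lt_max_iff.mpr (Or.inl h))
      · exact Or.inl (lt_max_iff.mpr (Or.inr hx))
      · exact Or.inr ⟨f, hf, hx⟩

theorem lt_maxPr_iff (full p rest : List (List Int)) (r : List Int)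
    (h : full = p ++ r :: rest)
    (hpw : full.Pairwise (fun a b => pvBef b a = false)) :
    (pvG1 r < pvMaxPr p) ↔ (pvAdom full r = true) := by
  subst h
  rw [List.pairwise_append] at hpw
  obtain ⟨hp, hr, hcross⟩ := hpw
  rw [List.pairwise_cons] at hr
  unfold pvMaxPr
  rw [lt_foldlMax]
  simp only [pvAdom, dominatedIn, Bool.or_eq_true, List.any_eq_true, decide_eq_true_eq,
    Bool.and_eq_true]
  constructor
  · rintro (h | ⟨e, he, hx⟩)
    · exact Or.inr h
    · -- e in prefix with pvG1 e > pvG1 r dominates r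
      have hR := hcross e he r (List.mem_cons_self ..)
      rw [pvBef_false_iff] at hR
      refine Or.inl ⟨e, List.mem_append.mpr (Or.inl he), ?_, ?_⟩ <;> omega
  · rintro (⟨q, hq, h0, h1⟩ | h)
    · rcases List.mem_append.mp hq with hq | hq
      · exact Or.inr ⟨q, hq, h1⟩
      · rcases List.mem_cons.mp hq with rfl | hq
        · omega
        · have hR := hr.1 q hq
          rw [pvBef_false_iff] at hR
          omega
    · exact Or.inl h

theorem pvMaxPr_append (p : List (List Int)) (r : List Int) :
    pvMaxPr (p ++ [r]) = max (pvMaxPr p) (pvG1 r) := by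
  simp [pvMaxPr, List.foldl_append]

theorem sweepA_run (full : List (List Int)) (wanho : List Int)
    (hpw : full.Pairwise (fun a b => pvBef b a = false)) :
    ∀ (rest p inc : List (List Int)), full = p ++ rest →
      sweepA wanho rest (pvMaxPr p) inc =
        (if rest.any (fun r => pvAdom full r && decide ([pvG0 r, pvG1 r] = wanho)) then none
         else some (inc ++ (rest.filter (fun r => !pvAdom full r)).map
            (fun r => [pvG0 r, pvG1 r]))) := by
  intro rest
  induction rest with
  | nil => intro p inc _; simp [sweepA]
  | cons r rest ih =>
    intro p inc hfull
    have hc : (pvG1 r < pvMaxPr p) ↔ (pvAdom full r = true) :=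
      lt_maxPr_iff full p rest r hfull hpw
    rw [sweepA]
    by_cases had : pvAdom full r = true
    · rw [if_pos (hc.mpr had)]
      by_cases heq : [pvG0 r, pvG1 r] = wanho
      · rw [if_pos heq]
        rw [if_pos (by simp [had, heq])]
      · rw [if_neg heq]
        have hmax : pvMaxPr (p ++ [r]) = pvMaxPr p := by
          rw [pvMaxPr_append]; have := hc.mpr had; omega
        have := ih (p ++ [r]) inc (by simp [hfull])
        rw [hmax] at this
        rw [this]
        simp only [List.any_cons, List.filter_cons, had, heq, decide_false, Bool.and_false,
          Bool.false_or, Bool.not_true]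
        rfl
    · rw [if_neg (fun hlt => had (hc.mp hlt))]
      have hmax : pvMaxPr (p ++ [r]) = pvG1 r := by
        rw [pvMaxPr_append]
        have : ¬ (pvG1 r < pvMaxPr p) := fun hlt => had (hc.mp hlt)
        omega
      have := ih (p ++ [r]) (inc ++ [[pvG0 r, pvG1 r]]) (by simp [hfull])
      rw [hmax] at this
      rw [this]
      have hadf : pvAdom full r = false := Bool.eq_false_iff.mpr had
      simp only [List.any_cons, List.filter_cons, hadf, Bool.false_and, Bool.false_or,
        Bool.not_false, if_pos, List.map_cons, List.append_assoc, List.singleton_append]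

theorem foldl_count {α : Type} (p : α → Prop) [DecidablePred p] (l : List α) :
    ∀ init : Int, l.foldl (fun a x => if p x then a + 1 else a) init =
      init + ((l.countP fun x => decide (p x)) : Int) := by
  induction l with
  | nil => intro init; simp
  | cons x l ih =>
    intro init
    rw [List.foldl_cons, ih, List.countP_cons]
    by_cases h : p x <;> simp [h] <;> push_cast <;> omega

theorem countP_lt {α : Type} (p q : α → Bool) (l : List α)
    (hle : ∀ a ∈ l, p a = true → q a = true) (x : α) (hx : x ∈ l)
    (hqx : q x = true) (hpx : p x = false) : l.countP p < l.countP q := by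
  induction l with
  | nil => cases hx
  | cons y l ih =>
    rw [List.countP_cons, List.countP_cons]
    rcases List.mem_cons.mp hx with rfl | hx
    · have hple : l.countP p ≤ l.countP q :=
        List.countP_mono_left (fun a ha => hle a (List.mem_cons_of_mem _ ha))
      rw [hpx, hqx]
      norm_num
      omega
    · have hlt := ih (fun a ha hp => hle a (List.mem_cons_of_mem _ ha) hp) hx
      have : (if p y = true then 1 else 0) ≤ (if q y = true then 1 else 0) := by
        by_cases h : p y = true
        · rw [if_pos h, if_pos (hle y (List.mem_cons_self ..) h)]
        · rw [if_neg h]; split <;> omega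
      omega

theorem pvG0_pair (a b : Int) : pvG0 [a, b] = a := rfl
theorem pvG1_pair (a b : Int) : pvG1 [a, b] = b := rfl
theorem pyGetD_zero (scores : List (List Int)) :
    PySem.List.pyGetD scores 0 [] = scores.headD [] := by
  cases scores <;> simp [PySem.List.pyGetD, PySem.List.pyGet?, PySem.List.pyIdx?]

theorem dominatedIn_perm {s t : List (List Int)} (h : s.Perm t) (a b : Int) :
    dominatedIn s a b = dominatedIn t a b := by
  rw [Bool.eq_iff_iff]
  simp only [dominatedIn, List.any_eq_true]
  constructor <;> rintro ⟨q, hq, hh⟩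
  · exact ⟨q, h.mem_iff.mp hq, hh⟩
  · exact ⟨q, h.mem_iff.mpr hq, hh⟩

theorem row0_mem (scores : List (List Int)) (hne : scores ≠ []) :
    PySem.List.pyGetD scores 0 [] ∈ scores := by
  cases scores with
  | nil => exact absurd rfl hne
  | cons c t => rw [pyGetD_zero]; exact List.mem_cons_self ..

theorem solution_char (scores : List (List Int)) (hne : scores ≠ []) :
    solution scores =
      if dominatedIn scores (pvG0 (PySem.List.pyGetD scores 0 []))
            (pvG1 (PySem.List.pyGetD scores 0 [])) = true ∨
          pvG1 (PySem.List.pyGetD scores 0 []) < -1 then -1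
      else 1 + ((scores.countP fun r =>
          !pvAdom scores r &&
            decide (pvG0 (PySem.List.pyGetD scores 0 []) + pvG1 (PySem.List.pyGetD scores 0 [])
              < pvG0 r + pvG1 r)) : Int) := by
  have hperm := PySem.List.sorted2_perm scores (fun x => -(pvG0 x)) (fun x => pvG1 x) false
  have hpw := sortedA_pairwise scores
  set row0 := PySem.List.pyGetD scores 0 [] with hrow0
  set s := PySem.List.sorted2 scores (fun x => -(pvG0 x)) (fun x => pvG1 x) with hs
  set w0 := pvG0 row0
  set w1 := pvG1 row0
  have hrun := sweepA_run s [w0, w1] hpw s [] [] rfl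
  have hmem_s : row0 ∈ s := hperm.mem_iff.mpr (row0_mem scores hne)
  have hany : (s.any fun r => pvAdom s r && decide ([pvG0 r, pvG1 r] = [w0, w1])) =
      (dominatedIn scores w0 w1 || decide (w1 < -1)) := by
    rw [Bool.eq_iff_iff]
    simp only [List.any_eq_true, Bool.and_eq_true, decide_eq_true_eq, Bool.or_eq_true]
    constructor
    · rintro ⟨r, hr, had, heq⟩
      have h0 : pvG0 r = w0 := by injection heq
      have h1 : pvG1 r = w1 := by
        injection heq with _ h'; injection h'
      rw [pvAdom, h0, h1, dominatedIn_perm hperm, Bool.or_eq_true, decide_eq_true_eq] at had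
      exact had
    · intro h
      refine ⟨row0, hmem_s, ?_, rfl⟩
      rw [pvAdom, dominatedIn_perm hperm, Bool.or_eq_true, decide_eq_true_eq]
      exact h
  show (match sweepA [w0, w1] s (-1) [] with
        | none => (-1 : Int)
        | some inc => get_rank (inc.map (fun x => pvSum x)) (pvSum [w0, w1])) = _
  rw [show (-1 : Int) = pvMaxPr [] from rfl, hrun, hany]
  by_cases hcond : (dominatedIn scores w0 w1 || decide (w1 < -1)) = true
  · rw [if_pos hcond]
    rw [if_pos]
    rw [Bool.or_eq_true, decide_eq_true_eq] at hcond
    exact hcond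
  · rw [if_neg hcond]
    rw [if_neg (by rw [Bool.or_eq_true, decide_eq_true_eq] at hcond; exact hcond)]
    show get_rank _ _ = _
    rw [get_rank, foldl_count (fun ss => ss > pvSum [w0, w1])]
    rw [show pvSum [w0, w1] = w0 + w1 from rfl]
    congr 1
    norm_cast
    rw [List.nil_append, List.countP_map, List.countP_map, List.countP_filter]
    rw [hperm.countP_eq]
    apply List.countP_congr
    intro r hr
    simp only [Function.comp, pvSum, pvG0_pair, pvG1_pair, Bool.and_eq_true, decide_eq_true_eq,
      Bool.not_eq_true']
    rw [pvAdom, pvAdom, dominatedIn_perm hperm]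
    constructor
    · rintro ⟨hgt, had⟩; exact ⟨had, hgt⟩
    · rintro ⟨had, hgt⟩; exact ⟨hgt, had⟩

theorem solution_alt_char (scores : List (List Int)) :
    solution_alt scores =
      if dominatedIn scores (pvG0 (PySem.List.pyGetD scores 0 []))
          (pvG1 (PySem.List.pyGetD scores 0 [])) = true then -1
      else 1 + ((scores.countP fun r =>
          decide ((pvG0 (PySem.List.pyGetD scores 0 []) + pvG1 (PySem.List.pyGetD scores 0 [])
              < pvG0 r + pvG1 r) ∧
            ¬ dominatedIn scores (pvG0 r) (pvG1 r) = true)) : Int) := by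
  set row0 := PySem.List.pyGetD scores 0 []
  set w0 := pvG0 row0
  set w1 := pvG1 row0
  show (if dominatedIn scores w0 w1 then (-1 : Int) else _) = _
  by_cases h : dominatedIn scores w0 w1 = true
  · rw [if_pos h, if_pos h]
  · rw [if_neg h, if_neg h]
    rw [foldl_count (fun r => w0 + w1 < pvSum r ∧ ¬ dominatedIn scores (pvG0 r) (pvG1 r))]
    simp only [pvSum]
    rfl

theorem undom_iff (scores : List (List Int)) (r : List Int) :
    (∀ q ∈ scores, pvG0 q ≤ pvG0 r ∨ pvG1 q ≤ pvG1 r) ↔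
      dominatedIn scores (pvG0 r) (pvG1 r) = false := by
  rw [Bool.eq_false_iff, Ne]
  simp only [dominatedIn, List.any_eq_true, Bool.and_eq_true, decide_eq_true_eq]
  constructor
  · rintro h ⟨q, hq, h0, h1⟩
    rcases h q hq with h' | h' <;> omega
  · intro h q hq
    by_contra hc
    push_neg at hc
    exact h ⟨q, hq, by omega, by omega⟩

theorem D_iff (scores : List (List Int)) (hne : scores ≠ []) :
    D_solution scores ↔
      dominatedIn scores (pvG0 (PySem.List.pyGetD scores 0 []))
          (pvG1 (PySem.List.pyGetD scores 0 [])) = false ∧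
        (pvG1 (PySem.List.pyGetD scores 0 []) < -1 ∨
          (-1 ≤ pvG1 (PySem.List.pyGetD scores 0 []) ∧
            ∃ r ∈ scores, pvG1 r < -1 ∧
              pvG0 (PySem.List.pyGetD scores 0 []) + pvG1 (PySem.List.pyGetD scores 0 [])
                < pvG0 r + pvG1 r ∧
              dominatedIn scores (pvG0 r) (pvG1 r) = false)) := by
  unfold D_solution
  rw [pyGetD_zero]
  simp only [undom_iff, pvSum]
  constructor
  · rintro ⟨h1, r, hr, hr1, hrund, hcase⟩
    refine ⟨h1, ?_⟩
    by_cases hw : pvG1 (scores.headD []) < -1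
    · exact Or.inl hw
    · rcases hcase with hcase | hcase
      · exact absurd hcase hw
      · exact Or.inr ⟨by omega, r, hr, hr1, hcase, hrund⟩
  · rintro ⟨h1, hw | ⟨hw, r, hr, hr1, hsum, hrund⟩⟩
    · exact ⟨h1, scores.headD [], by cases scores with
        | nil => exact absurd rfl hne
        | cons c t => exact List.mem_cons_self .., hw, h1, Or.inl hw⟩
    · exact ⟨h1, r, hr, hr1, hrund, Or.inr hsum⟩

theorem main_unchanged (scores : List (List Int)) (hne : scores ≠ [])
    (hnd : ¬ D_solution scores) : solution scores = solution_alt scores := by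
  rw [solution_char scores hne, solution_alt_char scores]
  rw [D_iff scores hne] at hnd
  set row0 := PySem.List.pyGetD scores 0 []
  set w0 := pvG0 row0
  set w1 := pvG1 row0
  by_cases hdom : dominatedIn scores w0 w1 = true
  · rw [if_pos (Or.inl hdom), if_pos hdom]
  · have hdomf : dominatedIn scores w0 w1 = false := Bool.eq_false_iff.mpr hdom
    push_neg at hnd
    have hnd2 := hnd hdomf
    have hw1 : -1 ≤ w1 := hnd2.1
    have hall := hnd2.2 hw1
    rw [if_neg (not_or.mpr ⟨hdom, by omega⟩), if_neg hdom]
    congr 1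
    norm_cast
    apply List.countP_congr
    intro r hr
    simp only [Bool.and_eq_true, Bool.not_eq_true', decide_eq_true_eq, pvAdom,
      Bool.or_eq_false_iff, decide_eq_false_iff_not]
    constructor
    · rintro ⟨⟨hd, _⟩, hgt⟩
      exact ⟨hgt, by simp [hd]⟩
    · rintro ⟨hgt, hd⟩
      have hdf : dominatedIn scores (pvG0 r) (pvG1 r) = false := Bool.eq_false_iff.mpr hd
      refine ⟨⟨hdf, ?_⟩, hgt⟩
      intro hlt
      exact (hall r hr hlt hgt) hdf

theorem main_tight (scores : List (List Int)) (hne : scores ≠ [])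
    (hd : D_solution scores) : solution scores ≠ solution_alt scores := by
  rw [solution_char scores hne, solution_alt_char scores]
  rw [D_iff scores hne] at hd
  set row0 := PySem.List.pyGetD scores 0 []
  set w0 := pvG0 row0
  set w1 := pvG1 row0
  obtain ⟨hdomf, hcase⟩ := hd
  rcases hcase with hw1 | ⟨hw1, r, hr, hr1, hrsum, hrdom⟩
  · rw [if_pos (Or.inr hw1), if_neg (by simp [hdomf])]
    have hnn : (0 : Int) ≤ ((scores.countP fun r =>
        decide ((w0 + w1 < pvG0 r + pvG1 r) ∧ ¬ dominatedIn scores (pvG0 r) (pvG1 r) = true)) : Int) :=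
      Int.natCast_nonneg _
    omega
  · rw [if_neg (not_or.mpr ⟨by simp [hdomf], by omega⟩), if_neg (by simp [hdomf])]
    have hlt : scores.countP (fun r => !pvAdom scores r && decide (w0 + w1 < pvG0 r + pvG1 r)) <
        scores.countP (fun r =>
          decide ((w0 + w1 < pvG0 r + pvG1 r) ∧ ¬ dominatedIn scores (pvG0 r) (pvG1 r) = true)) := by
      refine countP_lt _ _ _ ?hle r hr ?hqx ?hpx
      case hle =>
        intro a _ ha
        simp only [Bool.and_eq_true, Bool.not_eq_true', pvAdom, Bool.or_eq_false_iff,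
          decide_eq_true_eq, decide_eq_false_iff_not] at ha ⊢
        exact ⟨ha.2, by simp [ha.1.1]⟩
      case hqx =>
        simp only [decide_eq_true_eq]
        exact ⟨hrsum, by simp [hrdom]⟩
      case hpx =>
        simp only [pvAdom, Bool.and_eq_false_iff, Bool.not_eq_false', Bool.or_eq_true,
          decide_eq_true_eq]
        exact Or.inl (Or.inr hr1)
    omega

-- ===== VERDICT (by name: the statement is the Claim_ definition above) =====
theorem solution_spec : Claim_unchanged_solution := by
  intro scores _ hpre hnd
  exact main_unchanged scores hpre.1 hnd

theorem solution_changed : Claim_changed_solution := by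
  unfold Claim_changed_solution; decide

theorem solution_tight : Claim_exact_solution := by
  intro scores _ hpre hd
  exact main_tight scores hpre.1 hd
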